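-- pv_equiv track=rewrite | github.com/DaphneO/DECIBEL | decibel/utils/chordtemplategenerator.py | _generate_chroma
-- ===== SOURCE A (Python) =====
-- def _generate_chroma(chord_template_list):
--     # type: ((str, list[int])) -> list[(int, str, list[int])]
--     """
--     Generate a list of chord templates (key-mode-chroma tuples), based on the chord template list.
--     :param chord_template_list: list of names and intervals forming chords
--     :return: List of chord templates: (key, mode-str, chroma-list) tuples
--     >>> _generate_chroma(CHORD_TEMPLATES_MAJOR_MINOR)[0]
--     [0, '', [1, 0, 0, 0, 1, 0, 0, 1, 0, 0, 0, 0]]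
--     >>> _generate_chroma(CHORD_TEMPLATES_MAJOR_MINOR)[23]
--     [11, 'm', [0, 0, 1, 0, 0, 0, 1, 0, 0, 0, 0, 1]]
--     """
--     result = []
--     for chord_template in chord_template_list:
--         for key_note in range(0, 12):
--             chroma = [0, 0, 0, 0, 0, 0, 0, 0, 0, 0, 0, 0]
--             for note_index in chord_template[1]:
--                 chroma[(note_index + key_note) % 12] = 1
--             result.append([key_note, chord_template[0], chroma])
--     return result
-- ===== SOURCE B (Python) =====
-- def _generate_chroma(chord_template_list):
--     result = []
--     for name, intervals in chord_template_list:
--         base = [0] * 12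
--         for note_index in intervals:
--             base[note_index % 12] = 1
--         result.extend([key, name, [base[(j - key) % 12] for j in range(12)]]
--                       for key in range(12))
--     return result
-- ===== Notes on version B (the rewrite author's own statement) =====
-- stated objective: faster
-- what changed: B computes each template's base chroma once (one pass over the interval list) and derives the 12 key-transposed chromas by rotating that base, instead of re-scanning the interval list for every key as A does.
import Mathlib
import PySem

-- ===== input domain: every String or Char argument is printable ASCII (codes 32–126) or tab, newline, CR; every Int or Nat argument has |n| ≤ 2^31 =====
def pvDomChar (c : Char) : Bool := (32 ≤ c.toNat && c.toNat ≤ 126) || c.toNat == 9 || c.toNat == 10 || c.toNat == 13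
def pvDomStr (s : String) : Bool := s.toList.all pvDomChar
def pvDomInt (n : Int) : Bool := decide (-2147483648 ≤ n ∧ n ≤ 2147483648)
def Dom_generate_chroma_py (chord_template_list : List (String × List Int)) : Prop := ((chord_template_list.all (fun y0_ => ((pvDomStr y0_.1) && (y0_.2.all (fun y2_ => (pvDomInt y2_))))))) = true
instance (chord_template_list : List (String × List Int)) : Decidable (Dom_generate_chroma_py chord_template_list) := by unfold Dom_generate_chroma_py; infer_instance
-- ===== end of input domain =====

-- B computes each template's base chroma once and derives the 12 keys by rotation,
-- instead of re-scanning the interval list for every key (alternative decomposition, same cost class).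


-- ===== PORT A =====
-- chroma = [0]*... ; for note_index in template[1]: chroma[(note_index+key)%12] = 1
def pvChromaA (intervals : List Int) (key_note : Int) : List Int :=
  intervals.foldl
    (fun chroma note_index => PySem.List.pySetD chroma (PySem.Int.mod (note_index + key_note) 12) 1)
    [0, 0, 0, 0, 0, 0, 0, 0, 0, 0, 0, 0]

def generate_chroma_py (chord_template_list : List (String × List Int)) : List (Int × String × List Int) :=
  chord_template_list.foldl
    (fun result chord_template =>
      (PySem.List.pyRange 0 12 1).foldl
        (fun result key_note =>
          result ++ [(key_note, chord_template.1, pvChromaA chord_template.2 key_note)])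
        result)
    []

-- ===== PORT B =====
-- base = [0]*12 ; for note_index in intervals: base[note_index % 12] = 1
def pvBaseB (intervals : List Int) : List Int :=
  intervals.foldl
    (fun base note_index => PySem.List.pySetD base (PySem.Int.mod note_index 12) 1)
    (List.replicate 12 0)

-- [base[(j - key) % 12] for j in range(12)]
def pvRotB (base : List Int) (key : Int) : List Int :=
  (PySem.List.pyRange 0 12 1).map (fun j => PySem.List.pyGetD base (PySem.Int.mod (j - key) 12) 0)

def generate_chroma_py_alt (chord_template_list : List (String × List Int)) : List (Int × String × List Int) :=
  chord_template_list.foldl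
    (fun result t =>
      let base := pvBaseB t.2
      result ++ (PySem.List.pyRange 0 12 1).map (fun key => (key, t.1, pvRotB base key)))
    []

-- ===== PRECONDITION & SPEC =====
def Spec_generate_chroma_py (chord_template_list : List (String × List Int)) (out : List (Int × String × List Int)) : Prop := out = generate_chroma_py_alt chord_template_list
instance (chord_template_list : List (String × List Int)) (out : List (Int × String × List Int)) : Decidable (Spec_generate_chroma_py chord_template_list out) := by unfold Spec_generate_chroma_py; infer_instance

-- ===== CLAIM (what is proved, stated in full; the proofs are below) =====
def Claim_equal_generate_chroma_py : Prop := ∀ (chord_template_list : List (String × List Int)), Dom_generate_chroma_py chord_template_list → Spec_generate_chroma_py chord_template_list (generate_chroma_py chord_template_list)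

-- ===== LEMMAS AND PROOFS =====

theorem pv_len_fold_set (f : Int → Int) (ns : List Int) (l : List Int)
    (hf : ∀ n ∈ ns, 0 ≤ f n) :
    (ns.foldl (fun ch n => PySem.List.pySetD ch (f n) 1) l).length = l.length := by
  induction ns generalizing l with
  | nil => rfl
  | cons n ns ih =>
      simp only [List.foldl_cons]
      rw [ih _ (fun m hm => hf m (List.mem_cons_of_mem _ hm)),
        PySem.List.pySetD_of_nonneg _ _ (hf n (List.mem_cons_self)), List.length_set]

theorem pv_getD_fold_set (f : Int → Int) (ns : List Int) (l : List Int)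
    (hf : ∀ n ∈ ns, 0 ≤ f n ∧ f n < (l.length : Int)) (j : Nat) (hj : j < l.length) :
    (ns.foldl (fun ch n => PySem.List.pySetD ch (f n) 1) l).getD j 0 =
      if ∃ n ∈ ns, f n = (j : Int) then 1 else l.getD j 0 := by
  induction ns generalizing l with
  | nil => simp
  | cons n ns ih =>
      have h0 := (hf n List.mem_cons_self).1
      simp only [List.foldl_cons]
      rw [PySem.List.pySetD_of_nonneg _ _ h0]
      rw [ih (l.set (f n).toNat 1)
        (by intro m hm
            have := hf m (List.mem_cons_of_mem _ hm)
            simpa [List.length_set] using this)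
        (by simpa [List.length_set] using hj)]
      rw [List.getD_eq_getElem _ _ (by simpa [List.length_set] using hj), List.getElem_set,
        List.getD_eq_getElem _ _ hj]
      by_cases hrest : ∃ m ∈ ns, f m = (j : Int)
      · have hall : ∃ m ∈ n :: ns, f m = (j : Int) := by
          obtain ⟨m, hm, hfm⟩ := hrest
          exact ⟨m, List.mem_cons_of_mem _ hm, hfm⟩
        rw [if_pos hrest, if_pos hall]
      · rw [if_neg hrest]
        by_cases hn : f n = (j : Int)
        · have hidx : (f n).toNat = j := by omega
          have hall : ∃ m ∈ n :: ns, f m = (j : Int) := ⟨n, List.mem_cons_self, hn⟩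
          rw [if_pos hidx, if_pos hall]
        · have hidx : (f n).toNat ≠ j := by omega
          have hall : ¬ ∃ m ∈ n :: ns, f m = (j : Int) := by
            rintro ⟨m, hm, hfm⟩
            rcases List.mem_cons.mp hm with rfl | hm'
            · exact hn hfm
            · exact hrest ⟨m, hm', hfm⟩
          rw [if_neg hidx, if_neg hall]

theorem pv_lit_getD (j : Nat) (h : j < 12) :
    ([0, 0, 0, 0, 0, 0, 0, 0, 0, 0, 0, 0] : List Int).getD j 0 = 0 := by
  interval_cases j <;> rfl

theorem pv_chroma_eq (ns : List Int) (key : Int) (_hk0 : 0 ≤ key) (_hk : key < 12) :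
    pvChromaA ns key = pvRotB (pvBaseB ns) key := by
  have h12 : (0 : Int) < 12 := by norm_num
  have hlenA : (pvChromaA ns key).length = 12 := by
    unfold pvChromaA
    rw [pv_len_fold_set (fun n => PySem.Int.mod (n + key) 12) ns _
      (fun n _ => PySem.Int.mod_nonneg _ h12)]
    rfl
  have hlenB : (pvBaseB ns).length = 12 := by
    unfold pvBaseB
    rw [pv_len_fold_set (fun n => PySem.Int.mod n 12) ns _
      (fun n _ => PySem.Int.mod_nonneg _ h12)]
    rfl
  apply List.ext_getElem
  · rw [hlenA]; unfold pvRotB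
    simp [PySem.List.length_pyRange_one]
  · intro j hjl hjr
    have hj : j < 12 := by rw [hlenA] at hjl; exact hjl
    have hL : (pvChromaA ns key)[j]'hjl =
        if ∃ n ∈ ns, PySem.Int.mod (n + key) 12 = (j : Int) then 1 else 0 := by
      rw [← List.getD_eq_getElem _ 0 hjl]
      have h := pv_getD_fold_set (fun n => PySem.Int.mod (n + key) 12) ns
        [0, 0, 0, 0, 0, 0, 0, 0, 0, 0, 0, 0]
        (fun n _ => ⟨PySem.Int.mod_nonneg _ h12, by
          have := PySem.Int.mod_lt (n + key) h12; simpa using this⟩) j (by simpa using hj)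
      rw [pv_lit_getD j hj] at h
      exact h
    have hi0 : 0 ≤ PySem.Int.mod ((0 + (j : Int)) - key) 12 := PySem.Int.mod_nonneg _ h12
    have hi12 : PySem.Int.mod ((0 + (j : Int)) - key) 12 < 12 := PySem.Int.mod_lt _ h12
    have hR : (pvRotB (pvBaseB ns) key)[j]'hjr =
        if ∃ n ∈ ns, PySem.Int.mod n 12 = PySem.Int.mod ((0 + (j : Int)) - key) 12
          then 1 else 0 := by
      unfold pvRotB
      rw [List.getElem_map, PySem.List.getElem_pyRange_one]
      rw [PySem.List.pyGetD_eq_getElem (pvBaseB ns) 0 hi0 (by rw [hlenB]; exact_mod_cast hi12)]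
      rw [← List.getD_eq_getElem _ 0 (by rw [hlenB]; omega)]
      unfold pvBaseB
      have h := pv_getD_fold_set (fun n => PySem.Int.mod n 12) ns (List.replicate 12 0)
        (fun n _ => ⟨PySem.Int.mod_nonneg _ h12, by
          have := PySem.Int.mod_lt n h12; simpa using this⟩)
        (PySem.Int.mod ((0 + (j : Int)) - key) 12).toNat (by simp; omega)
      rw [h, List.getD_replicate _ (by simp; omega)]
      have hcast : ((PySem.Int.mod ((0 + (j : Int)) - key) 12).toNat : Int) =
          PySem.Int.mod ((0 + (j : Int)) - key) 12 := by omega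
      rw [hcast]
    have hmod : ∀ n : Int, (PySem.Int.mod (n + key) 12 = (j : Int)) ↔
        (PySem.Int.mod n 12 = PySem.Int.mod ((0 + (j : Int)) - key) 12) := by
      intro n
      simp only [PySem.Int.mod_eq_emod_of_pos h12]
      constructor <;> intro h <;> omega
    have hiff : (∃ n ∈ ns, PySem.Int.mod (n + key) 12 = (j : Int)) ↔
        (∃ n ∈ ns, PySem.Int.mod n 12 = PySem.Int.mod ((0 + (j : Int)) - key) 12) :=
      exists_congr fun n => and_congr_right fun _ => hmod n
    by_cases hc : ∃ n ∈ ns, PySem.Int.mod (n + key) 12 = (j : Int)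
    · rw [hL, hR, if_pos hc, if_pos (hiff.mp hc)]
    · rw [hL, hR, if_neg hc, if_neg ((not_iff_not.mpr hiff).mp hc)]

-- ===== VERDICT (by name: the statement is the Claim_ definition above) =====
theorem generate_chroma_py_spec : Claim_equal_generate_chroma_py := by
  intro l _
  unfold Spec_generate_chroma_py generate_chroma_py generate_chroma_py_alt
  have hstep : ∀ (result : List (Int × String × List Int)) (t : String × List Int),
      (PySem.List.pyRange 0 12 1).foldl
        (fun result key_note => result ++ [(key_note, t.1, pvChromaA t.2 key_note)]) result =
      result ++ (PySem.List.pyRange 0 12 1).map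
        (fun key => (key, t.1, pvRotB (pvBaseB t.2) key)) := by
    intro result t
    rw [PySem.List.foldl_append_singleton_eq_map]
    congr 1
    refine List.map_congr_left ?_
    intro key hkey
    have hm := (PySem.List.mem_pyRange_one).mp hkey
    rw [pv_chroma_eq t.2 key hm.1 hm.2]
  simp only [hstep]
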